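-- pv_equiv track=rewrite | github.com/0707pinar/Emotion-Analysis | preprocessing_steps.py | add_whitespace_before_and_after_punctuation_for_instagram
-- ===== SOURCE A (Python) =====
-- def add_whitespace_before_and_after_punctuation_for_instagram(text_in_list):
--     selected_punctuations = '!\"#$%&()*+,_-./:;<=>?[\]^`{|}~'
--     text_with_space_before_punctuation = []
--
--     for line in text_in_list:
--         text_with_space_before_punctuation.append([" ".join(line).translate(str.maketrans({key: " {0} ".format(key) for key in selected_punctuations}))])
--
--     tokenized_text_with_space_before_punctuation = []
--     for line in text_with_space_before_punctuation:
--         tokenized_text_with_space_before_punctuation.append(" ".join(line).strip().split())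
--     return tokenized_text_with_space_before_punctuation
-- ===== SOURCE B (Python) =====
-- def add_whitespace_before_and_after_punctuation_for_instagram(text_in_list):
--     selected_punctuations = '!\"#$%&()*+,_-./:;<=>?[\]^`{|}~'
--     result = []
--     for line in text_in_list:
--         tokens = []
--         cur = ""
--         for c in " ".join(line):
--             if c.isspace():
--                 if cur:
--                     tokens.append(cur)
--                 cur = ""
--             elif c in selected_punctuations:
--                 if cur:
--                     tokens.append(cur)
--                 tokens.append(c)
--                 cur = ""
--             else:
--                 cur += c
--         if cur:
--             tokens.append(cur)
--         result.append(tokens)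
--     return result
-- ===== Notes on version B (the rewrite author's own statement) =====
-- stated objective: simpler
-- what changed: Replaces the translate-table pipeline (build a punctuation->' c '-padded intermediate string, then strip and whitespace-split it) by a single character scan per line that maintains a token buffer, flushing on whitespace and emitting punctuation as its own token, so no intermediate spaced string is ever built.
import Mathlib
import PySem

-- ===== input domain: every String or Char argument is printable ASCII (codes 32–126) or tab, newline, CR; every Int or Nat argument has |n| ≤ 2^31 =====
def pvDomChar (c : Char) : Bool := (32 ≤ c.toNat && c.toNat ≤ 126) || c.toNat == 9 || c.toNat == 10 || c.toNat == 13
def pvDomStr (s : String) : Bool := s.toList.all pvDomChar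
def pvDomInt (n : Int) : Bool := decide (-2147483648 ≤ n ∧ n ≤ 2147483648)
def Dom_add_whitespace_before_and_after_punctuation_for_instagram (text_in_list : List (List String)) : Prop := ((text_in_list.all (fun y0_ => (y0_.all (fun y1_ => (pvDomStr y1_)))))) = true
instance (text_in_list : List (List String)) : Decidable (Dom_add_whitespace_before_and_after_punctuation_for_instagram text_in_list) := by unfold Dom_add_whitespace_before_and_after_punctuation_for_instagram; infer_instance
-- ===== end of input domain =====

-- B replaces A's join→translate-table→strip→split pipeline by a single character scan
-- with a token buffer per line (objective: simpler/alternative; no intermediate spaced string is built).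

-- ===== PORT A =====

-- the literal punctuation string '!\"#$%&()*+,_-./:;<=>?[\]^`{|}~'
def pvPunct : List Char :=
  ['!', '"', '#', '$', '%', '&', '(', ')', '*', '+', ',', '_', '-', '.', '/',
   ':', ';', '<', '=', '>', '?', '[', '\\', ']', '^', '`', '{', '|', '}', '~']

-- s.translate(str.maketrans({key: " {0} ".format(key) for key in selected_punctuations}))
def pvTranslate (s : String) : String :=
  String.ofList (s.toList.flatMap (fun c => if pvPunct.contains c then [' ', c, ' '] else [c]))

def add_whitespace_before_and_after_punctuation_for_instagram (text_in_list : List (List String)) : List (List String) :=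
  -- first loop: per line, [" ".join(line).translate(...)]
  let text_with_space_before_punctuation : List (List String) :=
    text_in_list.map (fun line => [pvTranslate (PySem.Str.join " " line)])
  -- second loop: per line, " ".join(line).strip().split()
  text_with_space_before_punctuation.map
    (fun line => PySem.Str.split₀ (PySem.Str.strip (PySem.Str.join " " line)))

-- ===== PORT B =====

-- B's inner loop: scan the chars of " ".join(line), flushing the buffer `cur` into `tokens`
-- on whitespace, emitting punctuation as its own token, accumulating otherwise.
def pvScan : List Char → List (List Char) → List Char → List (List Char)
  | [], tokens, cur => if cur.isEmpty then tokens else tokens ++ [cur]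
  | c :: rest, tokens, cur =>
    if PySem.Chars.isspace c then
      pvScan rest (if cur.isEmpty then tokens else tokens ++ [cur]) []
    else if pvPunct.contains c then
      pvScan rest ((if cur.isEmpty then tokens else tokens ++ [cur]) ++ [[c]]) []
    else
      pvScan rest tokens (cur ++ [c])

def add_whitespace_before_and_after_punctuation_for_instagram_alt (text_in_list : List (List String)) : List (List String) :=
  text_in_list.map (fun line =>
    (pvScan (PySem.Str.join " " line).toList [] []).map String.ofList)

-- ===== PRECONDITION & SPEC =====
def Spec_add_whitespace_before_and_after_punctuation_for_instagram (text_in_list : List (List String)) (out : List (List String)) : Prop := out = add_whitespace_before_and_after_punctuation_for_instagram_alt text_in_list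
instance (text_in_list : List (List String)) (out : List (List String)) : Decidable (Spec_add_whitespace_before_and_after_punctuation_for_instagram text_in_list out) := by unfold Spec_add_whitespace_before_and_after_punctuation_for_instagram; infer_instance

-- ===== CLAIM (what is proved, stated in full; the proofs are below) =====
def Claim_equal_add_whitespace_before_and_after_punctuation_for_instagram : Prop := ∀ (text_in_list : List (List String)), Dom_add_whitespace_before_and_after_punctuation_for_instagram text_in_list → Spec_add_whitespace_before_and_after_punctuation_for_instagram text_in_list (add_whitespace_before_and_after_punctuation_for_instagram text_in_list)

-- ===== LEMMAS AND PROOFS =====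

-- translation on char lists
def pvTransL (cs : List Char) : List Char :=
  cs.flatMap (fun c => if pvPunct.contains c then [' ', c, ' '] else [c])

theorem pvTransL_nil : pvTransL [] = [] := rfl

theorem pvTransL_cons (c : Char) (rest : List Char) :
    pvTransL (c :: rest) = (if pvPunct.contains c then [' ', c, ' '] else [c]) ++ pvTransL rest := rfl

theorem pvTransL_def (cs : List Char) :
    cs.flatMap (fun c => if pvPunct.contains c then [' ', c, ' '] else [c]) = pvTransL cs := rfl

set_option maxRecDepth 4000 in
theorem pvPunct_not_space (c : Char) (h : pvPunct.contains c = true) :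
    PySem.Chars.isspace c = false := by
  have hm : c ∈ pvPunct := by simpa using h
  fin_cases hm <;> decide

theorem pvSpace_isspace : PySem.Chars.isspace ' ' = true := by decide

-- factor the output accumulator out of pvScan
theorem pvScan_out (cs : List Char) (out : List (List Char)) (cur : List Char) :
    pvScan cs out cur = out ++ pvScan cs [] cur := by
  induction cs generalizing out cur with
  | nil => simp only [pvScan]; split <;> simp
  | cons c rest ih =>
    simp only [pvScan]
    split_ifs <;>
      first
        | exact ih _ _
        | (rw [ih]; conv_rhs => rw [ih]
           simp)

-- main bridge: split₀'s worker on the translated string is B's scan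
theorem pvGo_trans (cs : List Char) (cur : List Char) (acc : List (List Char)) :
    PySem.Chars.split₀.go (pvTransL cs) cur acc
      = acc.reverse ++ pvScan cs [] cur.reverse := by
  induction cs generalizing cur acc with
  | nil =>
    simp only [pvTransL_nil, PySem.Chars.split₀.go, pvScan]
    by_cases h : cur.isEmpty <;> simp [h]
  | cons c rest ih =>
    rw [pvTransL_cons]
    cases hp : pvPunct.contains c with
    | true =>
      have hs := pvPunct_not_space c hp
      rw [if_pos rfl]
      have step : PySem.Chars.split₀.go ([' ', c, ' '] ++ pvTransL rest) cur acc
          = PySem.Chars.split₀.go (pvTransL rest) []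
              ([c] :: (if cur.isEmpty then acc else cur.reverse :: acc)) := by
        by_cases h : cur.isEmpty <;>
          simp [PySem.Chars.split₀.go, pvSpace_isspace, hs, h]
      rw [step, ih]
      simp only [pvScan, hs, hp, Bool.false_eq_true, if_false, if_true]
      conv_rhs => rw [pvScan_out]
      by_cases h : cur.isEmpty <;> simp_all
    | false =>
      rw [if_neg (by simp)]
      by_cases hs : PySem.Chars.isspace c = true
      · have step : PySem.Chars.split₀.go ([c] ++ pvTransL rest) cur acc
            = PySem.Chars.split₀.go (pvTransL rest) []
                (if cur.isEmpty then acc else cur.reverse :: acc) := by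
          by_cases h : cur.isEmpty <;> simp [PySem.Chars.split₀.go, hs, h]
        rw [step, ih]
        simp only [pvScan, hs, if_true]
        conv_rhs => rw [pvScan_out]
        by_cases h : cur.isEmpty <;> simp_all
      · have step : PySem.Chars.split₀.go ([c] ++ pvTransL rest) cur acc
            = PySem.Chars.split₀.go (pvTransL rest) (c :: cur) acc := by
          simp [PySem.Chars.split₀.go, hs]
        have hpm : c ∉ pvPunct := by simpa using hp
        rw [step, ih]
        simp [pvScan, hs, hpm]

-- go on an all-whitespace string just flushes
theorem pvGo_all_space : ∀ (t : List Char) (cur : List Char) (acc : List (List Char)),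
    (∀ c ∈ t, PySem.Chars.isspace c = true) →
    PySem.Chars.split₀.go t cur acc = PySem.Chars.split₀.go [] cur acc
  | [], _, _, _ => rfl
  | c :: t, cur, acc, ht => by
    have hc : PySem.Chars.isspace c = true := ht c (by simp)
    have step : PySem.Chars.split₀.go (c :: t) cur acc
        = PySem.Chars.split₀.go t [] (if cur.isEmpty then acc else cur.reverse :: acc) := by
      by_cases h : cur.isEmpty <;> simp [PySem.Chars.split₀.go, hc, h]
    rw [step, pvGo_all_space t [] _ (fun c hm => ht c (by simp [hm]))]
    by_cases h : cur.isEmpty <;> simp [PySem.Chars.split₀.go, h]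

-- go ignores a fully-whitespace tail
theorem pvGo_space_tail (s t : List Char) (cur : List Char) (acc : List (List Char))
    (ht : ∀ c ∈ t, PySem.Chars.isspace c = true) :
    PySem.Chars.split₀.go (s ++ t) cur acc = PySem.Chars.split₀.go s cur acc := by
  induction s generalizing cur acc with
  | nil => simpa using pvGo_all_space t cur acc ht
  | cons c s ih =>
    simp only [List.cons_append, PySem.Chars.split₀.go]
    split_ifs <;> apply ih

-- stripping does not change split₀
theorem pvSplit_strip (s : List Char) :
    PySem.Chars.split₀ (PySem.Chars.strip s) = PySem.Chars.split₀ s := by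
  unfold PySem.Chars.strip PySem.Chars.rstrip PySem.Chars.lstrip
  have hr : ∀ u : List Char,
      PySem.Chars.split₀ ((List.dropWhile PySem.Chars.isspace u.reverse).reverse)
        = PySem.Chars.split₀ u := by
    intro u
    conv_rhs => rw [show u = (List.dropWhile PySem.Chars.isspace u.reverse).reverse
        ++ (List.takeWhile PySem.Chars.isspace u.reverse).reverse by
      rw [← List.reverse_append, List.takeWhile_append_dropWhile]; simp]
    unfold PySem.Chars.split₀
    rw [pvGo_space_tail]
    intro c hc
    rw [List.mem_reverse] at hc
    exact List.mem_takeWhile_imp hc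
  rw [hr]
  unfold PySem.Chars.split₀
  induction s with
  | nil => rfl
  | cons c s ih =>
    by_cases hc : PySem.Chars.isspace c = true
    · rw [List.dropWhile_cons_of_pos (by simp [hc]), ih]
      simp [PySem.Chars.split₀.go, hc]
    · rw [List.dropWhile_cons_of_neg (by simp [hc])]

theorem pvLine_eq (line : List String) :
    PySem.Str.split₀ (PySem.Str.strip (PySem.Str.join " " [pvTranslate (PySem.Str.join " " line)]))
      = (pvScan (PySem.Str.join " " line).toList [] []).map String.ofList := by
  unfold PySem.Str.split₀ PySem.Str.strip PySem.Str.join pvTranslate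
  have hjoin : ∀ x : List Char, PySem.Chars.join (" ".toList) [x] = x := by
    intro x; simp [PySem.Chars.join, List.intercalate]
  simp only [List.map_cons, List.map_nil, String.toList_ofList, hjoin]
  rw [pvSplit_strip]
  unfold PySem.Chars.split₀
  rw [pvTransL_def, pvGo_trans]
  simp

-- ===== VERDICT (by name: the statement is the Claim_ definition above) =====
theorem add_whitespace_before_and_after_punctuation_for_instagram_spec : Claim_equal_add_whitespace_before_and_after_punctuation_for_instagram := by
  intro text_in_list _
  unfold Spec_add_whitespace_before_and_after_punctuation_for_instagram
  unfold add_whitespace_before_and_after_punctuation_for_instagram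
    add_whitespace_before_and_after_punctuation_for_instagram_alt
  dsimp only
  rw [List.map_map]
  apply List.map_congr_left
  intro line _
  simp only [Function.comp_apply]
  exact pvLine_eq line
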